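-- pv_equiv track=rewrite | github.com/utndatasystems/parachute | parachute_rewriter_utils.py | precompute_stuff
-- ===== SOURCE A (Python) =====
-- def precompute_stuff(join_preds):
--   # Take the distinct alias and map them to distinct indices.
--   alias2idx, idx2alias, alias2tn = dict(), dict(), dict()
--   for (alias_pair, _) in join_preds:
--     # Join predicate: ({'lt': 'link_type', 'ml': 'movie_link'}, 'lt.id = ml.link_type_id')
--     assert len(alias_pair) == 2
--     for alias in alias_pair.keys():
--       # Assign a unique integer.
--       if alias not in alias2idx:
--         idx = len(alias2idx)
--         alias2idx[alias] = idx
--         idx2alias[idx] = alias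
--
--       # Also construct a mapping alias2tn.
--       if alias not in alias2tn:
--         alias2tn[alias] = alias_pair[alias]
--   return alias2idx, idx2alias, alias2tn
-- ===== SOURCE B (Python) =====
-- def precompute_stuff(join_preds):
--   # Validate all predicates up front.
--   for (alias_pair, _) in join_preds:
--     assert len(alias_pair) == 2
--   # Flatten to one (alias, table_name) stream.
--   flat = [kv for (alias_pair, _) in join_preds for kv in alias_pair.items()]
--   aliases = [a for (a, _) in flat]
--   # Distinct aliases in first-occurrence order: sort the set by first position.
--   distinct = sorted(set(aliases), key=aliases.index)
--   # reversed insertion: earlier pairs overwrite later ones, so each alias keeps its FIRST table name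
--   first = dict(reversed(flat))
--   alias2idx = {a: i for i, a in enumerate(distinct)}
--   idx2alias = {i: a for i, a in enumerate(distinct)}
--   alias2tn = {a: first[a] for a in distinct}
--   return alias2idx, idx2alias, alias2tn
-- ===== Notes on version B (the rewrite author's own statement) =====
-- stated objective: alternative
-- what changed: A's single loop that grows three dicts incrementally is replaced by a flatten-then-dedup pipeline: flatten all alias pairs to one (alias, table) stream, obtain the distinct aliases in first-seen order as sorted(set(aliases), key=aliases.index), read each alias's first table name from dict(reversed(flat)), and build the three result dicts by comprehensions.
import Mathlib
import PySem

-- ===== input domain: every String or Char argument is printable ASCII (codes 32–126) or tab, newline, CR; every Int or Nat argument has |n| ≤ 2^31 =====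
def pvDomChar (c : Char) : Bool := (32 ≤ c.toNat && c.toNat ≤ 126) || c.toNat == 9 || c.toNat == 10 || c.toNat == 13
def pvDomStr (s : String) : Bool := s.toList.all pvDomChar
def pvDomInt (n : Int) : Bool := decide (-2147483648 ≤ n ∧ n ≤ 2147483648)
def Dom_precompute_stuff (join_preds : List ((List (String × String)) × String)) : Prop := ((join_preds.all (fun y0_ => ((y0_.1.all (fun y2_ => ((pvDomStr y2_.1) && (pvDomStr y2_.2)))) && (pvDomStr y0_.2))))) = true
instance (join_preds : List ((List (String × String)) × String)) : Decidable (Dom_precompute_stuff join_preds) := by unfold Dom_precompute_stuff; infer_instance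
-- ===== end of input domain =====

-- B replaces A's incremental three-dict loop by a flatten-then-dedup pipeline: flatten the alias
-- pairs to one stream, take sorted(set(aliases), key=aliases.index) as the distinct aliases in
-- first-seen order, read first table names off dict(reversed(flat)), and build the three dicts by
-- comprehensions.

-- ===== PORT A =====
-- body of A's inner loop 'for alias in alias_pair.keys(): …' (D is the dict alias_pair)
def pvStepA (D : PySem.Dict String String)
    (st : PySem.Dict String Int × PySem.Dict Int String × PySem.Dict String String)
    (al : String) :
    PySem.Dict String Int × PySem.Dict Int String × PySem.Dict String String :=
  let (a2i, i2a, a2t) := st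
  let (a2i, i2a) :=
    if !a2i.contains al then
      let idx : Int := a2i.size
      (a2i.insert al idx, i2a.insert idx al)
    else (a2i, i2a)
  -- alias ∈ alias_pair.keys() here, so the subscript alias_pair[alias] never raises: total via getD
  let a2t := if !a2t.contains al then a2t.insert al (D.getD al "") else a2t
  (a2i, i2a, a2t)

def precompute_stuff (join_preds : List ((List (String × String)) × String)) : (List (String × Int)) × (List (Int × String)) × (List (String × String)) :=
  let st := join_preds.foldl
    (fun st jp =>
      let D := PySem.Dict.ofList jp.1
      D.keys.foldl (pvStepA D) st)
    (PySem.Dict.empty, PySem.Dict.empty, PySem.Dict.empty)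
  (st.1.items, st.2.1.items, st.2.2.items)

-- ===== PORT B =====
def precompute_stuff_alt (join_preds : List ((List (String × String)) × String)) : (List (String × Int)) × (List (Int × String)) × (List (String × String)) :=
  -- flat = [kv for (alias_pair, _) in join_preds for kv in alias_pair.items()]
  let flat := join_preds.flatMap (fun jp => (PySem.Dict.ofList jp.1).items)
  let aliases := flat.map Prod.fst
  -- distinct = sorted(set(aliases), key=aliases.index); every element of the set is in aliases,
  -- so aliases.index never raises ValueError: total via index? + getD 0
  let distinct := PySem.List.sorted (PySem.Set.ofList aliases)
    (fun a => (PySem.List.index? aliases a).getD 0) false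
  -- first = dict(reversed(flat))
  let first := PySem.Dict.ofList flat.reverse
  -- {a: i for i, a in enumerate(distinct)}
  let a2i := (PySem.List.enumerate distinct).foldl
    (fun d (p : Int × String) => d.insert p.2 p.1) PySem.Dict.empty
  -- {i: a for i, a in enumerate(distinct)}
  let i2a := (PySem.List.enumerate distinct).foldl
    (fun d (p : Int × String) => d.insert p.1 p.2) PySem.Dict.empty
  -- {a: first[a] for a in distinct}; a ∈ distinct ⊆ keys of first, so first[a] never raises: getD
  let a2t := distinct.foldl (fun d a => d.insert a (first.getD a "")) PySem.Dict.empty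
  (a2i.items, i2a.items, a2t.items)

-- ===== PRECONDITION & SPEC =====
-- Pre_ excludes exactly the inputs where A's 'assert len(alias_pair) == 2' raises AssertionError
-- (a Python dict's len is its number of distinct keys; B raises there too).
def Pre_precompute_stuff (join_preds : List ((List (String × String)) × String)) : Prop :=
  ∀ jp ∈ join_preds, (PySem.List.dedup (jp.1.map Prod.fst)).length = 2
instance (join_preds : List ((List (String × String)) × String)) : Decidable (Pre_precompute_stuff join_preds) := by unfold Pre_precompute_stuff; infer_instance

def pvWitness_precompute_stuff : (List ((List (String × String)) × String)) :=
  [([("lt", "link_type"), ("ml", "movie_link")], "lt.id = ml.link_type_id")]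

def Spec_precompute_stuff (join_preds : List ((List (String × String)) × String)) (out : (List (String × Int)) × (List (Int × String)) × (List (String × String))) : Prop := out = precompute_stuff_alt join_preds
instance (join_preds : List ((List (String × String)) × String)) (out : (List (String × Int)) × (List (Int × String)) × (List (String × String))) : Decidable (Spec_precompute_stuff join_preds out) := by unfold Spec_precompute_stuff; infer_instance

-- ===== CLAIM (what is proved, stated in full; the proofs are below) =====
def Claim_equal_precompute_stuff : Prop := ∀ (join_preds : List ((List (String × String)) × String)), Dom_precompute_stuff join_preds → Pre_precompute_stuff join_preds → Spec_precompute_stuff join_preds (precompute_stuff join_preds)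

-- ===== LEMMAS AND PROOFS =====

-- the step 'if alias not in alias2tn: alias2tn[alias] = tn' of A's a2t component, isolated
def pvStepT (a2t : PySem.Dict String String) (kv : String × String) : PySem.Dict String String :=
  if !a2t.contains kv.1 then a2t.insert kv.1 kv.2 else a2t

-- first value bound to key a in the pair stream l
def pvFv (l : List (String × String)) (a : String) : Option String :=
  match l with
  | [] => none
  | kv :: t => if kv.1 = a then some kv.2 else pvFv t a

-- invariant of A's loop state: alias2idx / idx2alias are the enumeration of alias2tn's keys
def pvInv (st : PySem.Dict String Int × PySem.Dict Int String × PySem.Dict String String) : Prop :=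
  st.1.items = (PySem.List.enumerate st.2.2.keys).map (fun p => (p.2, p.1)) ∧
  st.2.1.items = PySem.List.enumerate st.2.2.keys ∧
  st.2.2.keys.Nodup

theorem pvStepA_stepT (D : PySem.Dict String String) (a2i : PySem.Dict String Int)
    (i2a : PySem.Dict Int String) (a2t : PySem.Dict String String) (kv : String × String)
    (hv : D.getD kv.1 "" = kv.2) (hInv : pvInv (a2i, i2a, a2t)) :
    (pvStepA D (a2i, i2a, a2t) kv.1).2.2 = pvStepT a2t kv ∧
      pvInv (pvStepA D (a2i, i2a, a2t) kv.1) := by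
  obtain ⟨h1, h2, h3⟩ := hInv
  replace h1 : a2i.items = (PySem.List.enumerate a2t.keys).map (fun p => (p.2, p.1)) := h1
  replace h2 : i2a.items = PySem.List.enumerate a2t.keys := h2
  replace h3 : a2t.keys.Nodup := h3
  have hkeys1 : a2i.keys = a2t.keys := by
    show a2i.items.map Prod.fst = _
    simp [h1, List.map_map, Function.comp_def, PySem.List.map_snd_enumerate]
  have hcont : a2i.contains kv.1 = a2t.contains kv.1 := by
    rw [PySem.Dict.contains_eq_decide_mem_keys, PySem.Dict.contains_eq_decide_mem_keys, hkeys1]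
  by_cases hc : a2t.contains kv.1 = true
  · refine ⟨?_, ?_, ?_, ?_⟩ <;> simp [pvStepA, pvStepT, hcont, hc, h1, h2, h3]
  · simp only [Bool.not_eq_true] at hc
    have hconti : a2i.contains kv.1 = false := by rw [hcont, hc]
    have hmem : kv.1 ∉ a2t.keys := by
      rw [← PySem.Dict.contains_iff_mem_keys]; simp [hc]
    have hszn : a2i.size = a2t.keys.length := by
      show a2i.items.length = _
      simp [h1, PySem.List.length_enumerate]
    have hi2acont : i2a.contains ((a2i.size : Int)) = false := by
      rw [← Bool.not_eq_true, PySem.Dict.contains_iff_mem_keys]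
      show ¬ _ ∈ i2a.items.map Prod.fst
      rw [h2]
      intro hm
      simp only [List.mem_map] at hm
      obtain ⟨p, hp, hfst⟩ := hm
      rw [PySem.List.mem_enumerate_iff] at hp
      obtain ⟨k, hk, rfl⟩ := hp
      rw [hszn] at hfst
      simp at hfst
      omega
    have hres : pvStepA D (a2i, i2a, a2t) kv.1 =
        (a2i.insert kv.1 (a2i.size : Int), i2a.insert ((a2i.size : Int)) kv.1,
          a2t.insert kv.1 kv.2) := by
      simp [pvStepA, hconti, hc, hv]
    have hstepT : pvStepT a2t kv = a2t.insert kv.1 kv.2 := by simp [pvStepT, hc]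
    have hkeys' : (a2t.insert kv.1 kv.2).keys = a2t.keys ++ [kv.1] := by
      simp [PySem.Dict.keys_insert_of_not_contains, hc]
    have henum : PySem.List.enumerate (a2t.keys ++ [kv.1]) 0 =
        PySem.List.enumerate a2t.keys 0 ++ [((a2t.keys.length : Int), kv.1)] := by
      rw [PySem.List.enumerate_append]
      simp [PySem.List.enumerate_cons, PySem.List.enumerate_nil]
    rw [hres, hstepT]
    refine ⟨rfl, ?_, ?_, ?_⟩
    · show (a2i.insert kv.1 (a2i.size : Int)).items = _
      rw [PySem.Dict.items_insert_of_not_contains _ _ hconti, hkeys']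
      simp [henum, h1, hszn]
    · show (i2a.insert ((a2i.size : Int)) kv.1).items = _
      rw [PySem.Dict.items_insert_of_not_contains _ _ hi2acont, hkeys']
      simp [henum, h2, hszn]
    · show (a2t.insert kv.1 kv.2).keys.Nodup
      rw [hkeys']
      refine List.Nodup.append h3 (List.nodup_singleton _) ?_
      intro a ha hb
      simp only [List.mem_singleton] at hb
      exact hmem (hb ▸ ha)

theorem pvInner (D : PySem.Dict String String) (l : List (String × String))
    (hl : ∀ kv ∈ l, D.getD kv.1 "" = kv.2)
    (st : PySem.Dict String Int × PySem.Dict Int String × PySem.Dict String String)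
    (hInv : pvInv st) :
    ((l.map Prod.fst).foldl (pvStepA D) st).2.2 = l.foldl pvStepT st.2.2 ∧
      pvInv ((l.map Prod.fst).foldl (pvStepA D) st) := by
  induction l generalizing st with
  | nil => exact ⟨rfl, hInv⟩
  | cons kv t ih =>
    obtain ⟨st1, st2, st3⟩ := st
    have hstep := pvStepA_stepT D st1 st2 st3 kv (hl kv (by simp)) hInv
    simp only [List.map_cons, List.foldl_cons]
    have hrec := ih (fun kv hm => hl kv (by simp [hm])) (pvStepA D (st1, st2, st3) kv.1) hstep.2
    rw [hstep.1] at hrec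
    exact hrec

theorem pvOuter (jps : List ((List (String × String)) × String))
    (st : PySem.Dict String Int × PySem.Dict Int String × PySem.Dict String String)
    (hInv : pvInv st) :
    (jps.foldl
      (fun st jp =>
        let D := PySem.Dict.ofList jp.1
        D.keys.foldl (pvStepA D) st) st).2.2 =
      jps.foldl (fun a2t jp => (PySem.Dict.ofList jp.1).items.foldl pvStepT a2t) st.2.2 ∧
      pvInv (jps.foldl
        (fun st jp =>
          let D := PySem.Dict.ofList jp.1
          D.keys.foldl (pvStepA D) st) st) := by
  induction jps generalizing st with
  | nil => exact ⟨rfl, hInv⟩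
  | cons jp t ih =>
    simp only [List.foldl_cons]
    have hv : ∀ kv ∈ (PySem.Dict.ofList jp.1).items,
        (PySem.Dict.ofList jp.1).getD kv.1 "" = kv.2 := by
      intro kv hm
      exact PySem.Dict.getD_of_mem_items _ (by simpa using hm) (PySem.Dict.nodup_keys_ofList _) ""
    have hkeys : (PySem.Dict.ofList jp.1).keys = (PySem.Dict.ofList jp.1).items.map Prod.fst := rfl
    have hstep := pvInner (PySem.Dict.ofList jp.1) (PySem.Dict.ofList jp.1).items hv st hInv
    rw [← hkeys] at hstep
    have hrec := ih _ hstep.2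
    rw [hstep.1] at hrec
    exact hrec

-- the per-predicate pvStepT folds fuse into one fold over the flattened stream
theorem pvFlatten (jps : List ((List (String × String)) × String))
    (d : PySem.Dict String String) :
    jps.foldl (fun a2t jp => (PySem.Dict.ofList jp.1).items.foldl pvStepT a2t) d =
      (jps.flatMap (fun jp => (PySem.Dict.ofList jp.1).items)).foldl pvStepT d := by
  induction jps generalizing d with
  | nil => rfl
  | cons jp t ih => simp only [List.foldl_cons, List.flatMap_cons, List.foldl_append]; exact ih _

-- lookup after A's first-wins fold = existing binding, else first value in the stream
theorem pvGet_foldl_stepT (l : List (String × String)) (d : PySem.Dict String String)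
    (a : String) :
    ((l.foldl pvStepT d).get? a) = (d.get? a).or (pvFv l a) := by
  induction l generalizing d with
  | nil => simp [pvFv]
  | cons kv t ih =>
    simp only [List.foldl_cons]
    rw [ih]
    by_cases hc : d.contains kv.1 = true
    · have hstep : pvStepT d kv = d := by simp [pvStepT, hc]
      rw [hstep]
      by_cases hak : kv.1 = a
      · subst hak
        have : (d.get? kv.1).isSome := by rw [← PySem.Dict.contains_eq_isSome_get?, hc]
        obtain ⟨v, hv⟩ := Option.isSome_iff_exists.mp this
        simp [pvFv, hv]
      · simp [pvFv, hak]
    · simp only [Bool.not_eq_true] at hc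
      have hstep : pvStepT d kv = d.insert kv.1 kv.2 := by simp [pvStepT, hc]
      rw [hstep]
      have hd : d.get? kv.1 = none := by
        rw [PySem.Dict.get?_eq_none_iff_contains, hc]
      by_cases hak : kv.1 = a
      · subst hak
        simp [hd, pvFv]
      · rw [PySem.Dict.get?_insert]
        simp [pvFv, hak, Ne.symm hak]

-- keys after A's first-wins fold = set-update of the existing keys by the stream's keys
theorem pvKeys_foldl_stepT (l : List (String × String)) (d : PySem.Dict String String) :
    (l.foldl pvStepT d).keys = PySem.Set.update d.keys (l.map Prod.fst) := by
  induction l generalizing d with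
  | nil => simp [PySem.Set.update]
  | cons kv t ih =>
    simp only [List.foldl_cons, List.map_cons, PySem.Set.update_cons]
    rw [ih]
    congr 1
    by_cases hc : d.contains kv.1 = true
    · have hm : kv.1 ∈ d.keys := (PySem.Dict.contains_iff_mem_keys _ _).mp hc
      simp [pvStepT, hc, PySem.Set.add, PySem.Set.contains, hm]
    · simp only [Bool.not_eq_true] at hc
      have hm : kv.1 ∉ d.keys := fun h => by
        rw [(PySem.Dict.contains_iff_mem_keys _ _).mpr h] at hc; cases hc
      have hstep : pvStepT d kv = d.insert kv.1 kv.2 := by simp [pvStepT, hc]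
      rw [hstep, PySem.Dict.keys_insert_of_not_contains _ _ hc]
      simp [PySem.Set.add, PySem.Set.contains, hm]

-- dict(reversed(l)) looks up the FIRST value of the original stream
theorem pvGet_foldl_insert (m : List (String × String)) (d : PySem.Dict String String)
    (a : String) :
    ((m.foldl (fun d p => d.insert p.1 p.2) d).get? a) = (pvFv m.reverse a).or (d.get? a) := by
  induction m generalizing d with
  | nil => simp [pvFv]
  | cons p t ih =>
    simp only [List.foldl_cons, List.reverse_cons]
    rw [ih]
    have hfv : ∀ (u : List (String × String)),
        pvFv (u ++ [p]) a = (pvFv u a).or (if p.1 = a then some p.2 else none) := by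
      intro u
      induction u with
      | nil => simp [pvFv]
      | cons q r ihq => by_cases h : q.1 = a <;> simp [pvFv, h, ihq]
    rw [hfv]
    rw [PySem.Dict.get?_insert]
    cases hfa : pvFv t.reverse a with
    | some v => simp
    | none =>
      by_cases h : p.1 = a
      · subst h; simp
      · simp [h, Ne.symm h]

theorem pvGet_ofList_reverse (l : List (String × String)) (a : String) :
    (PySem.Dict.ofList l.reverse).get? a = pvFv l a := by
  have h : PySem.Dict.ofList l.reverse =
      l.reverse.foldl (fun d p => d.insert p.1 p.2) PySem.Dict.empty := rfl
  rw [h, pvGet_foldl_insert]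
  simp

-- first-occurrence positions strictly increase along set(xs)'s order
theorem pvPairwiseIdx (xs : List String) :
    (PySem.Set.ofList xs).Pairwise
      (fun a b => (PySem.List.index? xs a).getD 0 < (PySem.List.index? xs b).getD 0) := by
  induction xs with
  | nil => simp [PySem.Set.ofList_nil]
  | cons x t ih =>
    rw [PySem.Set.ofList_cons]
    constructor
    · intro b hb
      obtain ⟨hbt, hbx⟩ := (PySem.Set.mem_discard _ _ _).mp hb
      have hbmemt : b ∈ t := (PySem.Set.mem_ofList _ _).mp hbt
      obtain ⟨k, hk⟩ := Option.isSome_iff_exists.mp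
        ((PySem.List.index?_isSome_iff t b).mpr hbmemt)
      rw [PySem.List.index?_cons_self, PySem.List.index?_cons_of_ne t (Ne.symm hbx), hk]
      simp
    · have hsub : List.Sublist ((PySem.Set.ofList t).discard x) (PySem.Set.ofList t) := by
        simp [PySem.Set.discard]
      refine ((ih.sublist hsub).imp_of_mem ?_)
      intro a b ha hb hlt
      obtain ⟨hat', hax⟩ := (PySem.Set.mem_discard _ _ _).mp ha
      obtain ⟨hbt', hbx⟩ := (PySem.Set.mem_discard _ _ _).mp hb
      have hat : a ∈ t := (PySem.Set.mem_ofList _ _).mp hat'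
      have hbt : b ∈ t := (PySem.Set.mem_ofList _ _).mp hbt'
      obtain ⟨ka, hka⟩ := Option.isSome_iff_exists.mp ((PySem.List.index?_isSome_iff t a).mpr hat)
      obtain ⟨kb, hkb⟩ := Option.isSome_iff_exists.mp ((PySem.List.index?_isSome_iff t b).mpr hbt)
      rw [PySem.List.index?_cons_of_ne t (Ne.symm hax),
        PySem.List.index?_cons_of_ne t (Ne.symm hbx), hka, hkb]
      rw [hka, hkb] at hlt
      simp only [Option.map_some, Option.getD_some] at *
      omega

theorem precompute_stuff_spec : Claim_equal_precompute_stuff := by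
  unfold Claim_equal_precompute_stuff
  intro jps _ _
  unfold Spec_precompute_stuff precompute_stuff precompute_stuff_alt
  have h0 : pvInv (PySem.Dict.empty, PySem.Dict.empty, PySem.Dict.empty) :=
    ⟨rfl, rfl, List.nodup_nil⟩
  obtain ⟨hT, hI1, hI2, hN⟩ := pvOuter jps (PySem.Dict.empty, PySem.Dict.empty, PySem.Dict.empty) h0
  rw [pvFlatten] at hT
  set flat := jps.flatMap (fun jp => (PySem.Dict.ofList jp.1).items) with hflat
  -- keys of A's fused fold = set(aliases) (first-occurrence order)
  have hkeys : (flat.foldl pvStepT PySem.Dict.empty).keys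
      = PySem.Set.ofList (flat.map Prod.fst) := by
    rw [pvKeys_foldl_stepT]
    have h : (PySem.Dict.empty : PySem.Dict String String).keys = ([] : List String) := rfl
    rw [h, PySem.Set.update_nil_left]
  -- B's sorted(set(aliases), key=aliases.index) is set(aliases) itself
  have hsorted : PySem.List.sorted (PySem.Set.ofList (flat.map Prod.fst))
      (fun a => (PySem.List.index? (flat.map Prod.fst) a).getD 0) false
      = PySem.Set.ofList (flat.map Prod.fst) :=
    PySem.List.sorted_eq_of_perm_of_pairwise_lt _ _ _ (List.Perm.refl _)
      (pvPairwiseIdx (flat.map Prod.fst))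
  have hnodup : (PySem.Set.ofList (flat.map Prod.fst)).Nodup :=
    PySem.Set.nodup_ofList (flat.map Prod.fst)
  -- A's fold and B's dict(reversed(flat)) agree on every lookup
  have hget : ∀ a, (flat.foldl pvStepT PySem.Dict.empty).getD a ""
      = (PySem.Dict.ofList flat.reverse).getD a "" := by
    intro a
    rw [PySem.Dict.getD_eq_get?_getD, PySem.Dict.getD_eq_get?_getD, pvGet_foldl_stepT,
      pvGet_ofList_reverse]
    simp
  have hKN : (flat.foldl pvStepT PySem.Dict.empty).keys.Nodup := by rw [hkeys]; exact hnodup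
  have hitems : (flat.foldl pvStepT PySem.Dict.empty).items
      = (flat.foldl pvStepT PySem.Dict.empty).keys.map
          (fun a => (a, (flat.foldl pvStepT PySem.Dict.empty).getD a "")) :=
    PySem.Dict.items_eq_map_keys _ hKN ""
  -- B's three comprehension dicts, as item lists
  have hb_a2t : ((PySem.Set.ofList (flat.map Prod.fst)).foldl
      (fun d a => d.insert a ((PySem.Dict.ofList flat.reverse).getD a "")) PySem.Dict.empty).items
      = (PySem.Set.ofList (flat.map Prod.fst)).map
          (fun a => (a, (PySem.Dict.ofList flat.reverse).getD a "")) := by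
    have h := PySem.Dict.items_foldl_insert_fresh (PySem.Set.ofList (flat.map Prod.fst))
      (fun a => a) (fun a => (PySem.Dict.ofList flat.reverse).getD a "") PySem.Dict.empty
      (by intro a _; simp) (by simpa using hnodup)
    simpa using h
  have hb_a2i : ((PySem.List.enumerate (PySem.Set.ofList (flat.map Prod.fst))).foldl
      (fun d (p : Int × String) => d.insert p.2 p.1) PySem.Dict.empty).items
      = (PySem.List.enumerate (PySem.Set.ofList (flat.map Prod.fst))).map (fun p => (p.2, p.1)) := by
    have h := PySem.Dict.items_foldl_insert_fresh
      (PySem.List.enumerate (PySem.Set.ofList (flat.map Prod.fst)))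
      (fun p : Int × String => p.2) (fun p : Int × String => p.1) PySem.Dict.empty
      (by intro a _; simp)
      (by rw [PySem.List.map_snd_enumerate]; exact hnodup)
    simpa using h
  have hnodupfst : ((PySem.List.enumerate (PySem.Set.ofList (flat.map Prod.fst))).map
      Prod.fst).Nodup := by
    have hp := PySem.List.pairwise_lt_enumerate (xs := PySem.Set.ofList (flat.map Prod.fst)) (s := 0)
    have hlt : ((PySem.List.enumerate (PySem.Set.ofList (flat.map Prod.fst))).map
        Prod.fst).Pairwise (· < ·) := List.pairwise_map.mpr hp
    exact hlt.imp ne_of_lt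
  have hb_i2a : ((PySem.List.enumerate (PySem.Set.ofList (flat.map Prod.fst))).foldl
      (fun d (p : Int × String) => d.insert p.1 p.2) PySem.Dict.empty).items
      = PySem.List.enumerate (PySem.Set.ofList (flat.map Prod.fst)) := by
    have h := PySem.Dict.items_foldl_insert_fresh
      (PySem.List.enumerate (PySem.Set.ofList (flat.map Prod.fst)))
      (fun p : Int × String => p.1) (fun p : Int × String => p.2) PySem.Dict.empty
      (by intro a _; simp) hnodupfst
    simpa using h
  simp only [hsorted, hb_a2i, hb_i2a, hb_a2t]
  refine Prod.ext ?_ (Prod.ext ?_ ?_)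
  · show _ = _
    rw [hI1, hT, hkeys]
  · show _ = _
    rw [hI2, hT, hkeys]
  · show _ = _
    rw [hT, hitems, hkeys]
    exact List.map_congr_left (fun a _ => by rw [hget])
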